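-- pv_equiv track=rewrite | github.com/jurogrammer/studying | Algorithm/[프로그래머스]뉴스클러스터링.py | GetMultipleSet
-- ===== SOURCE A (Python) =====
-- def GetMultipleSet(string):
--     n = len(string)
--     multipleSet = {}
--     string = string.lower()
--     for i in range(1, n):
--         if string[i].isalpha() and string[i - 1].isalpha():
--             element = string[i] + string[i - 1]
--             if element in multipleSet:
--                 multipleSet[element] += 1
--             else:
--                 multipleSet[element] = 1
--     return multipleSet
-- ===== SOURCE B (Python) =====
-- def GetMultipleSet(string):
--     s = string.lower()
--     # partition into maximal runs of consecutive alphabetic characters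
--     runs = []
--     cur = []
--     for ch in s:
--         if ch.isalpha():
--             cur.append(ch)
--         elif cur:
--             runs.append(cur)
--             cur = []
--     if cur:
--         runs.append(cur)
--     counts = {}
--     for run in runs:
--         for prev, curch in zip(run, run[1:]):
--             key = curch + prev
--             counts[key] = counts.get(key, 0) + 1
--     return counts
-- ===== Notes on version B (the rewrite author's own statement) =====
-- stated objective: alternative
-- what changed: Instead of indexing the string with range(1, n) and testing both neighbours at every position, B partitions the lowered string into maximal alphabetic runs in one pass and then counts the adjacent pairs inside each run (dict.get-based counting), which visits each character's alpha test once.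
import Mathlib
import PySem

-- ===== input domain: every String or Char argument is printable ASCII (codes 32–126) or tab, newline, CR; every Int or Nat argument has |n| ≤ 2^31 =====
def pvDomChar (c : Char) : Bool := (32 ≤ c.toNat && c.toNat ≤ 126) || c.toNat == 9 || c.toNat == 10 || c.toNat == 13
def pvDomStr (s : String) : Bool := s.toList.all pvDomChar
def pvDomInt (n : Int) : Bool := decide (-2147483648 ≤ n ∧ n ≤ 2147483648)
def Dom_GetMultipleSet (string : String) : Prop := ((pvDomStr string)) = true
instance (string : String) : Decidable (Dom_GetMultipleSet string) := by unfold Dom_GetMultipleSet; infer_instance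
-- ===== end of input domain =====

-- B replaces A's index loop over range(1, n) by a one-pass partition of the lowered
-- string into maximal alphabetic runs followed by counting the adjacent pairs in each
-- run (objective: alternative decomposition, same cost).

-- ===== PORT A =====
-- indices i and i-1 are always in range for i ∈ range(1, n), so the pyGetD default ' ' is never used
def GetMultipleSet (string : String) : List (String × Int) :=
  let n : Int := PySem.Str.len string
  let s : List Char := (PySem.Str.lower string).toList
  let d := (PySem.List.pyRange 1 n 1).foldl (fun d i =>
      let ci := PySem.List.pyGetD s i ' '
      let cp := PySem.List.pyGetD s (i - 1) ' '
      if PySem.Chars.isalpha ci && PySem.Chars.isalpha cp then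
        let element := String.mk [ci, cp]
        if d.contains element then d.modify element 0 (· + 1)
        else d.insert element 1
      else d) PySem.Dict.empty
  d.items

-- ===== PORT B =====
-- one step of the partition loop: extend the current run, or close it on a non-letter
def pvStep (acc : List (List Char) × List Char) (ch : Char) : List (List Char) × List Char :=
  if PySem.Chars.isalpha ch then (acc.1, acc.2 ++ [ch])
  else if acc.2 = [] then acc
  else (acc.1 ++ [acc.2], [])

-- keys contributed by one run: cur + prev for each adjacent pair
def pvRunKeys (run : List Char) : List String :=
  (run.zip run.tail).map (fun p => String.mk [p.2, p.1])

def GetMultipleSet_alt (string : String) : List (String × Int) :=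
  let s : List Char := (PySem.Str.lower string).toList
  let acc := s.foldl pvStep ([], [])
  let runs := if acc.2 = [] then acc.1 else acc.1 ++ [acc.2]
  let keys := runs.flatMap pvRunKeys
  (keys.foldl (fun d k => d.insert k (d.getD k 0 + 1)) PySem.Dict.empty).items

-- ===== PRECONDITION & SPEC =====
def Spec_GetMultipleSet (string : String) (out : List (String × Int)) : Prop := out = GetMultipleSet_alt string
instance (string : String) (out : List (String × Int)) : Decidable (Spec_GetMultipleSet string out) := by unfold Spec_GetMultipleSet; infer_instance

-- ===== CLAIM (what is proved, stated in full; the proofs are below) =====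
def Claim_equal_GetMultipleSet : Prop := ∀ (string : String), Dom_GetMultipleSet string → Spec_GetMultipleSet string (GetMultipleSet string)

-- ===== LEMMAS AND PROOFS =====

-- adjacent pairs of a list
def pvPairs (r : List Char) : List (Char × Char) := r.zip r.tail

-- adjacent pairs (prev, cur) of a char list whose cur is alphabetic and whose prev was
-- alphabetic (the carried Option is the previous char iff it was alphabetic)
def pvFpAux (prev : Option Char) : List Char → List (Char × Char)
  | [] => []
  | a :: t =>
    (match prev with
     | some p => if PySem.Chars.isalpha a then [(p, a)] else []
     | none => []) ++ pvFpAux (if PySem.Chars.isalpha a then some a else none) t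

theorem pvPairs_append_singleton (cur : List Char) (a : Char) :
    pvPairs (cur ++ [a]) = pvPairs cur ++ (match cur.getLast? with
      | some p => [(p, a)] | none => []) := by
  induction cur with
  | nil => simp [pvPairs]
  | cons c cs ih =>
    cases cs with
    | nil => simp [pvPairs]
    | cons d cs' =>
      simp only [List.cons_append, pvPairs, List.tail_cons, List.zip_cons_cons] at *
      simp [ih, List.getLast?_cons_cons]

theorem pvFilter_zip (t : List Char) (a : Char) :
    ((a :: t).zip t).filter (fun p => PySem.Chars.isalpha p.1 && PySem.Chars.isalpha p.2)
      = pvFpAux (if PySem.Chars.isalpha a then some a else none) t := by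
  induction t generalizing a with
  | nil => simp [pvFpAux]
  | cons b t' ih =>
    simp only [List.zip_cons_cons, List.filter_cons, pvFpAux, ih]
    by_cases ha : PySem.Chars.isalpha a <;> by_cases hb : PySem.Chars.isalpha b <;>
      simp [ha, hb]

theorem pvFilter_zip_none (s : List Char) :
    (s.zip s.tail).filter (fun p => PySem.Chars.isalpha p.1 && PySem.Chars.isalpha p.2)
      = pvFpAux none s := by
  cases s with
  | nil => simp [pvFpAux]
  | cons a t => simpa [pvFpAux] using pvFilter_zip t a

theorem pvRuns_pairs (s : List Char) (rs : List (List Char)) (cur : List Char) :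
    (if (s.foldl pvStep (rs, cur)).2 = [] then (s.foldl pvStep (rs, cur)).1
     else (s.foldl pvStep (rs, cur)).1 ++ [(s.foldl pvStep (rs, cur)).2]).flatMap pvPairs
    = rs.flatMap pvPairs ++ pvPairs cur ++ pvFpAux cur.getLast? s := by
  induction s generalizing rs cur with
  | nil =>
    by_cases h : cur = [] <;> simp [h, pvPairs, pvFpAux]
  | cons a t ih =>
    simp only [List.foldl_cons]
    by_cases ha : PySem.Chars.isalpha a
    · have hstep : pvStep (rs, cur) a = (rs, cur ++ [a]) := by simp [pvStep, ha]
      rw [hstep, ih]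
      rw [pvPairs_append_singleton]
      cases hc : cur.getLast? with
      | none =>
        have : cur = [] := List.getLast?_eq_none_iff.mp hc
        simp [this, pvFpAux, ha]
      | some p =>
        have hne : cur ++ [a] ≠ [] := by simp
        simp [pvFpAux, ha, hc]
    · by_cases hc : cur = []
      · have hstep : pvStep (rs, cur) a = (rs, cur) := by simp [pvStep, ha, hc]
        rw [hstep, ih, hc]
        simp [pvFpAux, ha, pvPairs]
      · have hstep : pvStep (rs, cur) a = (rs ++ [cur], []) := by simp [pvStep, ha, hc]
        rw [hstep, ih]
        obtain ⟨p, hp⟩ := Option.ne_none_iff_exists'.mp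
          (mt List.getLast?_eq_none_iff.mp hc)
        simp [pvFpAux, ha, hp, pvPairs]

-- A's conditional counting step is a plain counter insert
theorem pvStepA_eq (d : PySem.Dict String Int) (k : String) :
    (if d.contains k then d.modify k 0 (· + 1) else d.insert k 1)
      = d.insert k (d.getD k 0 + 1) := by
  by_cases h : d.contains k
  · simp [h, PySem.Dict.modify]
  · simp only [h, if_false]
    rw [PySem.Dict.getD_of_not_contains]
    · norm_num
    · simpa using h

-- the range(1, n) loop indexed at i and i-1 is a fold over the adjacent-pair zip
theorem pvRange_fold_zip {β : Type} (s : List Char) (h : β → Char → Char → β)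
    (init : β) (dflt : Char) :
    (PySem.List.pyRange 1 (s.length : Int) 1).foldl
        (fun d i => h d (PySem.List.pyGetD s i dflt) (PySem.List.pyGetD s (i - 1) dflt)) init
      = (s.zip s.tail).foldl (fun d p => h d p.2 p.1) init := by
  rw [PySem.List.pyRange_one, List.foldl_map]
  have hlen : ((s.length : Int) - 1).toNat = s.length - 1 := by omega
  rw [hlen]
  have hzip : s.zip s.tail
      = (List.range (s.length - 1)).map (fun k => (s.getD k dflt, s.getD (k + 1) dflt)) := by
    apply List.ext_getElem
    · simp [List.length_zip, List.length_tail]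
    · intro i h1 h2
      have hi : i < s.length - 1 := by simpa using h2
      have hi1 : i < s.length := by omega
      have hi2 : i + 1 < s.length := by omega
      simp [List.getElem_zip, List.getElem_tail, List.getElem?_eq_getElem hi1,
        List.getElem?_eq_getElem hi2]
  rw [hzip, List.foldl_map]
  apply PySem.List.foldl_congr_mem
  intro acc k hk
  have hk' : k < s.length - 1 := by simpa using List.mem_range.mp hk
  have e1 : (1 : Int) + (k : Int) - 1 = (k : Int) := by omega
  have e2 : (1 : Int) + (k : Int) = ((k + 1 : Nat) : Int) := by push_cast; omega
  rw [e1, e2, PySem.List.pyGetD_natCast, PySem.List.pyGetD_natCast]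

-- the A-side fold specialised: range loop → zip fold (instance of pvRange_fold_zip)
theorem pvRange_fold_zip_A (s : List Char) :
    (PySem.List.pyRange 1 (s.length : Int) 1).foldl (fun d i =>
      if PySem.Chars.isalpha (PySem.List.pyGetD s i ' ') &&
          PySem.Chars.isalpha (PySem.List.pyGetD s (i - 1) ' ') then
        if d.contains (String.mk [PySem.List.pyGetD s i ' ', PySem.List.pyGetD s (i - 1) ' ']) then
          d.modify (String.mk [PySem.List.pyGetD s i ' ', PySem.List.pyGetD s (i - 1) ' ']) 0 (· + 1)
        else d.insert (String.mk [PySem.List.pyGetD s i ' ', PySem.List.pyGetD s (i - 1) ' ']) 1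
      else d) (PySem.Dict.empty : PySem.Dict String Int)
    = (s.zip s.tail).foldl (fun d p =>
      if PySem.Chars.isalpha p.2 && PySem.Chars.isalpha p.1 then
        if d.contains (String.mk [p.2, p.1]) then
          d.modify (String.mk [p.2, p.1]) 0 (· + 1)
        else d.insert (String.mk [p.2, p.1]) 1
      else d) (PySem.Dict.empty : PySem.Dict String Int) :=
  pvRange_fold_zip s (fun d ci cp =>
      if PySem.Chars.isalpha ci && PySem.Chars.isalpha cp then
        if d.contains (String.mk [ci, cp]) then d.modify (String.mk [ci, cp]) 0 (· + 1)
        else d.insert (String.mk [ci, cp]) 1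
      else d) (PySem.Dict.empty : PySem.Dict String Int) ' '

-- ===== VERDICT (by name: the statement is the Claim_ definition above) =====
set_option maxHeartbeats 1000000 in
theorem GetMultipleSet_spec : Claim_equal_GetMultipleSet := by
  intro string _
  unfold Spec_GetMultipleSet
  simp only [GetMultipleSet, GetMultipleSet_alt]
  congr 1
  have hn : PySem.Str.len string = (((PySem.Str.lower string).toList).length : Int) := by
    simp [PySem.Str.len, PySem.Str.lower, PySem.Chars.lower]
  rw [hn]
  set s : List Char := (PySem.Str.lower string).toList with hs
  rw [pvRange_fold_zip_A s]
  -- replace the contains/modify/insert step by the counter insert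
  refine Eq.trans (PySem.List.foldl_congr_mem (s.zip s.tail)
    (fun (d : PySem.Dict String Int) (p : Char × Char) =>
      if PySem.Chars.isalpha p.2 && PySem.Chars.isalpha p.1 then
        if d.contains (String.mk [p.2, p.1]) then
          d.modify (String.mk [p.2, p.1]) 0 (· + 1)
        else d.insert (String.mk [p.2, p.1]) 1
      else d)
    (fun (d : PySem.Dict String Int) (p : Char × Char) =>
      if PySem.Chars.isalpha p.2 && PySem.Chars.isalpha p.1 then
        d.insert (String.mk [p.2, p.1]) (d.getD (String.mk [p.2, p.1]) 0 + 1)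
      else d)
    (PySem.Dict.empty : PySem.Dict String Int)
    (fun acc p _ => by
      by_cases h : (PySem.Chars.isalpha p.2 && PySem.Chars.isalpha p.1) = true
      · simp only [h, if_true, pvStepA_eq]
      · simp [h])) ?_
  -- push the test into a filter, and identify the filtered pairs with pvFpAux
  refine Eq.trans (PySem.List.foldl_if_eq_foldl_filter
    (fun (p : Char × Char) => PySem.Chars.isalpha p.2 && PySem.Chars.isalpha p.1)
    (fun (d : PySem.Dict String Int) (p : Char × Char) =>
      d.insert (String.mk [p.2, p.1]) (d.getD (String.mk [p.2, p.1]) 0 + 1))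
    (s.zip s.tail) (PySem.Dict.empty : PySem.Dict String Int)) ?_
  rw [List.filter_congr (q := fun p => PySem.Chars.isalpha p.1 && PySem.Chars.isalpha p.2)
    (fun x _ => by rw [Bool.and_comm])]
  rw [pvFilter_zip_none]
  -- B side: the run pairs are exactly pvFpAux none s
  have hkeys : (if (s.foldl pvStep ([], [])).2 = [] then (s.foldl pvStep ([], [])).1
        else (s.foldl pvStep ([], [])).1 ++ [(s.foldl pvStep ([], [])).2]).flatMap pvRunKeys
      = (pvFpAux none s).map (fun p => String.mk [p.2, p.1]) := by
    have hrk : pvRunKeys = fun r => (pvPairs r).map (fun p => String.mk [p.2, p.1]) := by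
      funext r; rfl
    rw [hrk, ← List.map_flatMap]
    rw [pvRuns_pairs s [] []]
    simp [pvPairs]
  rw [hkeys, List.foldl_map]
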